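-- pv_equiv track=rewrite | github.com/adpena/molt | src/molt/stdlib/typing.py | _typing_parse_subscription
-- ===== SOURCE A (Python) =====
-- def _typing_parse_subscription(expr: str) -> tuple[str, str] | None:
--     text = expr.strip()
--     if not text.endswith("]"):
--         return None
--     depth = 0
--     open_idx = -1
--     for idx, ch in enumerate(text):
--         if ch == "[":
--             if depth == 0:
--                 open_idx = idx
--             depth += 1
--         elif ch == "]":
--             depth -= 1
--             if depth == 0:
--                 if idx != len(text) - 1 or open_idx <= 0:
--                     return None
--                 return (text[:open_idx].strip(), text[open_idx + 1 : -1].strip())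
--             if depth < 0:
--                 return None
--     return None
-- ===== SOURCE B (Python) =====
-- def _typing_parse_subscription(expr: str) -> tuple[str, str] | None:
--     text = expr.strip()
--     if not text.endswith("]"):
--         return None
--     open_idx = text.find("[")
--     if open_idx <= 0:
--         return None
--     base = text[:open_idx]
--     if "]" in base:
--         return None
--     inner = text[open_idx + 1 : -1]
--     depth = 0
--     for ch in inner:
--         if ch == "[":
--             depth += 1
--         elif ch == "]":
--             depth -= 1
--             if depth < 0:
--                 return None
--     if depth != 0:
--         return None
--     return (base.strip(), inner.strip())
-- ===== Notes on version B (the rewrite author's own statement) =====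
-- stated objective: alternative
-- what changed: Instead of A's single enumerate pass that tracks depth and records the top-level open bracket, B locates the base with str.find('['), rejects a ']' in the base via substring membership, and runs a balance check over only the inner slice text[open_idx+1:-1], returning the pair from slices.
import Mathlib
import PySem

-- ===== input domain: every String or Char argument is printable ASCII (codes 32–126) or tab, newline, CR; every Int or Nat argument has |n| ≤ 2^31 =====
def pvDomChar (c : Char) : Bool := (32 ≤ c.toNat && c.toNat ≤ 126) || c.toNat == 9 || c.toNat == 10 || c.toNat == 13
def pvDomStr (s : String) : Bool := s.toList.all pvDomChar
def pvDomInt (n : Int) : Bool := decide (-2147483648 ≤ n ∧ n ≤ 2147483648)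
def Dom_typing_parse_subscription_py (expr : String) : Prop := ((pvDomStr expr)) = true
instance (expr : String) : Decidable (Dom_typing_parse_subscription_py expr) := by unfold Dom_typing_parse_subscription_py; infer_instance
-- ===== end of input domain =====

-- B replaces A's single enumerate pass (tracking depth and the top-level open bracket) by str.find for the
-- base, a substring-membership rejection of ']' in the base, and a balance scan over only the inner slice;
-- objective: alternative decomposition of the same parse.

-- ===== PORT A =====
-- A's 'for idx, ch in enumerate(text)' loop, state (depth, open_idx)
def pvALoop (text : String) (ps : List (Int × Char)) (depth openIdx : Int) : Option (String × String) :=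
  match ps with
  | [] => none
  | (idx, ch) :: rest =>
    if ch = '[' then
      pvALoop text rest (depth + 1) (if depth = 0 then idx else openIdx)
    else if ch = ']' then
      if depth - 1 = 0 then
        if idx ≠ (PySem.Str.len text : Int) - 1 ∨ openIdx ≤ 0 then none
        else some (PySem.Str.strip (PySem.Str.slice text none (some openIdx)),
                   PySem.Str.strip (PySem.Str.slice text (some (openIdx + 1)) (some (-1))))
      else if depth - 1 < 0 then none
      else pvALoop text rest (depth - 1) openIdx
    else pvALoop text rest depth openIdx

def pvAGo (text : String) : Option (String × String) :=
  if PySem.Str.endswith text "]" = true then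
    pvALoop text (PySem.List.enumerate text.toList 0) 0 (-1)
  else none

def typing_parse_subscription_py (expr : String) : Option (String × String) :=
  pvAGo (PySem.Str.strip expr)

-- ===== PORT B =====
-- B's 'for ch in inner' balance loop; none = early return on depth < 0, else the final depth
def pvBLoop (cs : List Char) (depth : Int) : Option Int :=
  match cs with
  | [] => some depth
  | ch :: rest =>
    if ch = '[' then pvBLoop rest (depth + 1)
    else if ch = ']' then
      if depth - 1 < 0 then none else pvBLoop rest (depth - 1)
    else pvBLoop rest depth

def pvBGo (text : String) : Option (String × String) :=
  if PySem.Str.endswith text "]" = true then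
    let openIdx := PySem.Str.find text "["
    if openIdx ≤ 0 then none
    else
      let base := PySem.Str.slice text none (some openIdx)
      if PySem.Str.isIn "]" base = true then none
      else
        let inner := PySem.Str.slice text (some (openIdx + 1)) (some (-1))
        match pvBLoop inner.toList 0 with
        | none => none
        | some d => if d ≠ 0 then none else some (PySem.Str.strip base, PySem.Str.strip inner)
  else none

def typing_parse_subscription_py_alt (expr : String) : Option (String × String) :=
  pvBGo (PySem.Str.strip expr)

-- ===== PRECONDITION & SPEC =====
def Spec_typing_parse_subscription_py (expr : String) (out : Option (String × String)) : Prop := out = typing_parse_subscription_py_alt expr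
instance (expr : String) (out : Option (String × String)) : Decidable (Spec_typing_parse_subscription_py expr out) := by unfold Spec_typing_parse_subscription_py; infer_instance

-- ===== CLAIM (what is proved, stated in full; the proofs are below) =====
def Claim_equal_typing_parse_subscription_py : Prop := ∀ (expr : String), Dom_typing_parse_subscription_py expr → Spec_typing_parse_subscription_py expr (typing_parse_subscription_py expr)

-- ===== LEMMAS AND PROOFS =====

-- a one-character list is an infix of every list containing the character
theorem pv_singleton_infix {c : Char} {l : List Char} (h : c ∈ l) : [c] <:+: l := by
  obtain ⟨s, t, rfl⟩ := List.append_of_mem h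
  exact ⟨s, t, by simp⟩

-- xs[k:-1] = dropLast of drop k
theorem pv_slice_to_neg_one (xs : List Char) (k : Nat) (hk : k ≤ xs.length) :
    PySem.List.slice xs (some (k : Int)) (some (-1)) = (xs.drop k).dropLast := by
  simp [PySem.List.slice, pysem, Nat.min_eq_left hk]
  rw [List.dropLast_eq_take, List.length_drop]
  congr 1
  omega

-- Phase 1 of A's loop: at depth 0, chars before the first '[' are skipped; a ']' among them aborts
theorem pvALoop_prefix (text : String) (pre : List Char) (rs : List (Int × Char)) (s o : Int)
    (hno : '[' ∉ pre) :
    pvALoop text (PySem.List.enumerate pre s ++ rs) 0 o =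
      if ']' ∈ pre then none else pvALoop text rs 0 o := by
  induction pre generalizing s with
  | nil => simp [PySem.List.enumerate_nil]
  | cons c cs ih =>
    rw [PySem.List.enumerate_cons, List.cons_append]
    simp only [pvALoop]
    by_cases hc : c = '['
    · exact absurd (hc ▸ List.mem_cons_self) hno
    · by_cases hcr : c = ']'
      · subst hcr
        simp
      · simp only [if_neg hc, if_neg hcr]
        rw [ih (s + 1) (fun h => hno (List.mem_cons_of_mem _ h))]
        have hmem : (']' ∈ c :: cs) ↔ (']' ∈ cs) := by
          rw [List.mem_cons]
          constructor
          · rintro (h | h)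
            · exact absurd h.symm hcr
            · exact h
          · exact Or.inr
        simp only [hmem]

-- Phase 2 of A's loop vs B's balance loop: after the top-level '[', A at depth b+1 over ds ++ [']']
-- (whose final ']' sits at the last index of text) behaves as B's balance scan of ds at depth b
theorem pvALoop_inner (text : String) (ds : List Char) (idx b o : Int)
    (hb : 0 ≤ b) (hidx : idx + ds.length = (PySem.Str.len text : Int) - 1) :
    pvALoop text (PySem.List.enumerate (ds ++ [']']) idx) (b + 1) o =
      match pvBLoop ds b with
      | none => none
      | some d =>
          if d = 0 then
            if o ≤ 0 then none
            else some (PySem.Str.strip (PySem.Str.slice text none (some o)),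
                       PySem.Str.strip (PySem.Str.slice text (some (o + 1)) (some (-1))))
          else none := by
  induction ds generalizing idx b with
  | nil =>
    have hidx0 : idx = (PySem.Str.len text : Int) - 1 := by simpa using hidx
    simp only [List.nil_append, PySem.List.enumerate_cons, PySem.List.enumerate_nil,
      pvALoop, pvBLoop, if_true, if_false]
    by_cases hb0 : b = 0
    · subst hb0
      by_cases ho : o ≤ 0
      · simp [ho]
      · simp [ho, hidx0]
    · have e1 : ((b : Int) + 1 - 1) = b := by ring
      have e2 : ¬ ((b : Int) < 0) := by omega
      simp [e1, e2, hb0, pvALoop]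
  | cons c cs ih =>
    rw [List.cons_append, PySem.List.enumerate_cons]
    have hidx' : idx + 1 + (cs.length : Int) = (PySem.Str.len text : Int) - 1 := by
      rw [← hidx]
      push_cast [List.length_cons]
      ring
    by_cases hc : c = '['
    · subst hc
      simp only [pvALoop, pvBLoop, if_true, if_false]
      rw [if_neg (show ¬ (b + 1 = 0) by omega)]
      exact ih (idx + 1) (b + 1) (by omega) hidx'
    · by_cases hcr : c = ']'
      · subst hcr
        simp only [pvALoop, pvBLoop, if_true, if_false]
        by_cases hb0 : b = 0
        · subst hb0
          have hne : idx ≠ (PySem.Str.len text : Int) - 1 := by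
            have h := hidx
            push_cast [List.length_cons] at h
            omega
          have hne2 : ¬ (idx = (text.length : Int) - 1) := by
            have hl : (PySem.Str.len text : Int) = (text.length : Int) := by simp [pysem]
            rw [← hl]
            exact hne
          simp [hne, hne2]
        · rw [if_neg (show ¬ (b + 1 - 1 = 0) by omega), if_neg (show ¬ (b + 1 - 1 < 0) by omega),
            if_neg (show ¬ (b - 1 < 0) by omega)]
          have h := ih (idx + 1) (b - 1) (by omega) hidx'
          rw [show b + 1 - 1 = b - 1 + 1 by ring]
          exact h
      · simp only [pvALoop, pvBLoop, if_neg hc, if_neg hcr]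
        exact ih (idx + 1) b hb hidx'

-- the two pipelines agree on every (already stripped) text
theorem pvGo_eq (text : String) : pvAGo text = pvBGo text := by
  by_cases hE : PySem.Str.endswith text "]" = true
  · simp only [pvAGo, pvBGo, hE, if_true]
    have hsuf : [']'] <:+ text.toList := by
      have h := hE
      simp only [PySem.Str.endswith_eq] at h
      have h2 := (PySem.Chars.endswith_iff text.toList "]".toList).mp h
      simpa using h2
    obtain ⟨u, hu⟩ := hsuf
    have hlen : PySem.Str.len text = text.toList.length := by simp [pysem]
    have hfeq : "[".toList = ['['] := rfl
    have hfind : PySem.Str.find text "[" = PySem.Chars.find text.toList ['['] := by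
      simp only [PySem.Str.find_eq, hfeq]
    by_cases hneg : PySem.Chars.find text.toList ['['] = -1
    · -- no '[' at all: A skips to the final ']' and aborts; B rejects openIdx = -1 ≤ 0
      have hnomem : '[' ∉ text.toList := by
        intro hm
        exact (PySem.Chars.find_eq_neg_one_iff _ _).mp hneg (pv_singleton_infix hm)
      have hmem : ']' ∈ text.toList := by rw [← hu]; simp
      have hskip := pvALoop_prefix text text.toList [] 0 (-1) hnomem
      rw [List.append_nil] at hskip
      rw [hskip, if_pos hmem, hfind, hneg, if_pos (by norm_num : (-1 : Int) ≤ 0)]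
    · have hpos : 0 ≤ PySem.Chars.find text.toList ['['] := by
        have h := PySem.Chars.neg_one_le_find text.toList ['[']
        omega
      obtain ⟨j, hjint⟩ : ∃ jn : Nat, PySem.Chars.find text.toList ['['] = (jn : Int) :=
        ⟨_, (Int.toNat_of_nonneg hpos).symm⟩
      obtain ⟨hpre, hmin0⟩ := PySem.Chars.find_spec hpos
      rw [hjint, Int.toNat_natCast] at hpre hmin0
      obtain ⟨r, hr⟩ := hpre
      have hdropj : text.toList.drop j = '[' :: r := by simpa using hr.symm
      have hjlt : j < text.toList.length := by
        by_contra h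
        rw [List.drop_eq_nil_of_le (by omega)] at hdropj
        exact absurd hdropj (by simp)
      have hcons := List.drop_eq_getElem_cons (l := text.toList) (show j < text.toList.length by omega)
      have hinj := hdropj.symm.trans hcons
      injection hinj with h1 h2
      have hul : u.length + 1 = text.toList.length := by rw [← hu]; simp
      have hjltu : j < u.length := by
        by_contra hcon
        have hje : j = u.length := by omega
        have h8 : text.toList[j]? = some '[' := by
          rw [List.getElem?_eq_getElem (show j < text.toList.length by omega)]
          exact congrArg some h1.symm
        rw [hje, ← hu] at h8
        simp at h8
      have hsplit : text.toList = text.toList.take j ++ '[' :: r := by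
        conv_lhs => rw [← List.take_append_drop j text.toList, hdropj]
      have hbaselen : (text.toList.take j).length = j := by
        rw [List.length_take]
        omega
      have hnobase : '[' ∉ text.toList.take j := by
        intro hm
        obtain ⟨i, hi, hgi⟩ := List.mem_iff_getElem.mp hm
        have hil : i < j := by
          simp [List.length_take] at hi
          omega
        have hgi' : text.toList[i]'(by omega) = '[' := by
          rw [List.getElem_take] at hgi
          exact hgi
        refine hmin0 i hil ⟨text.toList.drop (i + 1), ?_⟩
        rw [List.singleton_append, ← hgi']
        exact (List.drop_eq_getElem_cons (by omega)).symm
      have hrsplit : r = u.drop (j + 1) ++ [']'] := by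
        rw [h2, ← hu, List.drop_append_of_le_length (by omega)]
      have hinner : r.dropLast = u.drop (j + 1) := by
        rw [hrsplit, List.dropLast_concat]
      have hrsplit' : r = r.dropLast ++ [']'] := by
        rw [hinner]
        exact hrsplit
      have hdl : r.dropLast.length = u.length - (j + 1) := by
        rw [hinner, List.length_drop]
      have hlen2 : ((j : Int) + 1) + (r.dropLast.length : Int) = (PySem.Str.len text : Int) - 1 := by
        rw [hlen, hdl]
        omega
      have hA : pvALoop text (PySem.List.enumerate text.toList 0) 0 (-1) =
          if ']' ∈ text.toList.take j then none
          else pvALoop text (PySem.List.enumerate ('[' :: r) (j : Int)) 0 (-1) := by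
        conv_lhs => rw [hsplit]
        rw [PySem.List.enumerate_append, pvALoop_prefix text _ _ 0 (-1) hnobase, hbaselen, zero_add]
      have hInner := pvALoop_inner text r.dropLast ((j : Int) + 1) 0 (j : Int) (by norm_num) hlen2
      rw [hfind, hjint]
      by_cases hj0 : (j : Int) ≤ 0
      · have hj00 : j = 0 := by omega
        rw [if_pos hj0, hA, if_neg (by rw [hj00]; simp)]
        rw [PySem.List.enumerate_cons]
        simp only [pvALoop, if_true, if_false]
        conv_lhs => rw [hrsplit']
        rw [hInner]
        rcases hB : pvBLoop r.dropLast 0 with _ | d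
        · simp [hB]
        · by_cases hd : d = 0 <;> simp [hB, hd, hj0] <;> omega
      · rw [if_neg hj0]
        have hbase_toList : (PySem.Str.slice text none (some (j : Int))).toList = text.toList.take j := by
          have hb1 : (PySem.Str.slice text none (some (j : Int))).toList =
              PySem.List.slice text.toList none (some (j : Int)) := by simp [pysem]
          rw [hb1, PySem.List.slice_to_natCast]
        have hceq : "]".toList = [']'] := rfl
        have hisin : PySem.Str.isIn "]" (PySem.Str.slice text none (some (j : Int))) =
            PySem.Chars.isIn [']'] (text.toList.take j) := by
          simp only [PySem.Str.isIn_eq, hceq, hbase_toList]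
        by_cases hmb : ']' ∈ text.toList.take j
        · rw [hA, if_pos hmb, hisin,
            if_pos ((PySem.Chars.isIn_iff_infix _ _).mpr (pv_singleton_infix hmb))]
        · have hfalse : PySem.Chars.isIn [']'] (text.toList.take j) = false := by
            rw [PySem.Chars.isIn_eq_false_iff]
            intro hinf
            obtain ⟨s1, s2, hseq⟩ := hinf
            exact hmb (by rw [← hseq]; simp)
          rw [hA, if_neg hmb, hisin, hfalse, if_neg (by simp)]
          have hinnerToList : (PySem.Str.slice text (some ((j : Int) + 1)) (some (-1))).toList
              = r.dropLast := by
            have h3 : ((j : Int) + 1) = ((j + 1 : Nat) : Int) := by push_cast; ring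
            have hb2 : (PySem.Str.slice text (some ((j : Int) + 1)) (some (-1))).toList =
                PySem.List.slice text.toList (some ((j : Int) + 1)) (some (-1)) := by simp [pysem]
            rw [hb2, h3, pv_slice_to_neg_one _ _ (by omega), ← h2]
          rw [hinnerToList]
          rw [PySem.List.enumerate_cons]
          simp only [pvALoop, if_true, if_false]
          conv_lhs => rw [hrsplit']
          rw [hInner]
          rcases hB : pvBLoop r.dropLast 0 with _ | d
          · simp [hB]
          · by_cases hd : d = 0 <;> simp [hB, hd, hj0] <;> omega
  · simp only [pvAGo, pvBGo]
    rw [if_neg hE, if_neg hE]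

-- ===== VERDICT (by name: the statement is the Claim_ definition above) =====
theorem typing_parse_subscription_py_spec : Claim_equal_typing_parse_subscription_py := by
  intro expr _
  unfold Spec_typing_parse_subscription_py typing_parse_subscription_py typing_parse_subscription_py_alt
  exact pvGo_eq _
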